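-- pv_equiv track=rewrite | github.com/supermari0/cs224NFinal | old_features.py | common_trigram_feature_dict
-- ===== SOURCE A (Python) =====
-- def common_trigram_feature_dict(common_trigrams_dict, token_tuples):
--     for i in range(2, len(token_tuples)):
--         token = token_tuples[i][0]
--         prev_token = token_tuples[i-1][0]
--         prev2_token = token_tuples[i-2][0]
--         trigram = prev2_token + '+' + prev_token + '+' + token
--         if trigram in common_trigrams_dict:
--             common_trigrams_dict[trigram] = 1
--
--     return common_trigrams_dict
-- ===== SOURCE B (Python) =====
-- def common_trigram_feature_dict(common_trigrams_dict, token_tuples):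
--     firsts = [t[0] for t in token_tuples]
--     present = set(a + '+' + b + '+' + c
--                   for a, b, c in zip(firsts, firsts[1:], firsts[2:]))
--     for key in common_trigrams_dict:
--         if key in present:
--             common_trigrams_dict[key] = 1
--     return common_trigrams_dict
-- ===== Notes on version B (the rewrite author's own statement) =====
-- stated objective: alternative
-- what changed: B inverts the traversal: it builds the set of trigrams present in the token sequence once (via zip of three shifted views) and then scans the dictionary's keys against that set, instead of scanning the tokens and doing a dict-membership test plus assignment per token as A does.
import Mathlib
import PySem

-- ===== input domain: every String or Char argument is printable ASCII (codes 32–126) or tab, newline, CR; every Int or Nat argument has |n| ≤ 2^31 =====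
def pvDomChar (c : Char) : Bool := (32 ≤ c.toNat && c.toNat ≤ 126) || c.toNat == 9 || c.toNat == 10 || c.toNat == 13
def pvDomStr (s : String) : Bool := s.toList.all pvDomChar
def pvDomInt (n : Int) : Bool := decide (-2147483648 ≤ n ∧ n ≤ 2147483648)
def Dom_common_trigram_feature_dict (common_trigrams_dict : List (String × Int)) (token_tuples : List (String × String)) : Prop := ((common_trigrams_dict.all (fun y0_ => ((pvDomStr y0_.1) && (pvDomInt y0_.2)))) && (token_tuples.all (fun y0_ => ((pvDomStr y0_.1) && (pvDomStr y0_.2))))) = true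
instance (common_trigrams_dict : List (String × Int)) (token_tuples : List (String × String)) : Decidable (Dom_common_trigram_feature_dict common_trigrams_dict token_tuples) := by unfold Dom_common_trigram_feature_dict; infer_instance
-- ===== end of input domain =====

-- B inverts the traversal: it precomputes the set of trigrams present in the token sequence and
-- scans the dictionary's keys against it, instead of scanning the tokens with dict lookups; both
-- A and B mutate the argument dict in place in Python (same side effect), the theorems are about
-- the returned value. Python str '+' concatenation is ported as Lean String '++' (exact).

-- ===== PORT A =====
def common_trigram_feature_dict (common_trigrams_dict : List (String × Int)) (token_tuples : List (String × String)) : List (String × Int) :=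
  ((PySem.List.pyRange 2 (token_tuples.length : Int) 1).foldl
    (fun d i =>
      let token := (PySem.List.pyGetD token_tuples i ("", "")).1
      let prev_token := (PySem.List.pyGetD token_tuples (i - 1) ("", "")).1
      let prev2_token := (PySem.List.pyGetD token_tuples (i - 2) ("", "")).1
      let trigram := prev2_token ++ "+" ++ prev_token ++ "+" ++ token
      if d.contains trigram then d.insert trigram 1 else d)
    (PySem.Dict.mk common_trigrams_dict)).items

-- ===== PORT B =====
def common_trigram_feature_dict_alt (common_trigrams_dict : List (String × Int)) (token_tuples : List (String × String)) : List (String × Int) :=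
  let firsts := token_tuples.map (fun t => t.1)
  let present : PySem.Set String :=
    PySem.Set.ofList
      (((firsts.zip (PySem.List.slice firsts (some 1) none)).zip
          (PySem.List.slice firsts (some 2) none)).map
        (fun p => p.1.1 ++ "+" ++ p.1.2 ++ "+" ++ p.2))
  let d0 := PySem.Dict.mk common_trigrams_dict
  (d0.keys.foldl
    (fun d k => if PySem.Set.contains present k then d.insert k 1 else d) d0).items

-- ===== PRECONDITION & SPEC =====
def Spec_common_trigram_feature_dict (common_trigrams_dict : List (String × Int)) (token_tuples : List (String × String)) (out : List (String × Int)) : Prop := out = common_trigram_feature_dict_alt common_trigrams_dict token_tuples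
instance (common_trigrams_dict : List (String × Int)) (token_tuples : List (String × String)) (out : List (String × Int)) : Decidable (Spec_common_trigram_feature_dict common_trigrams_dict token_tuples out) := by unfold Spec_common_trigram_feature_dict; infer_instance

-- ===== CLAIM (what is proved, stated in full; the proofs are below) =====
def Claim_equal_common_trigram_feature_dict : Prop := ∀ (common_trigrams_dict : List (String × Int)) (token_tuples : List (String × String)), Dom_common_trigram_feature_dict common_trigrams_dict token_tuples → Spec_common_trigram_feature_dict common_trigrams_dict token_tuples (common_trigram_feature_dict common_trigrams_dict token_tuples)

-- ===== LEMMAS AND PROOFS =====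

-- A's loop shape: conditionally overwriting existing keys with 1, driven by a list of candidate keys.
theorem pv_foldA_items (T : List String) (d : PySem.Dict String Int) :
    (T.foldl (fun d t => if d.contains t then d.insert t 1 else d) d).items
      = d.items.map (fun p => if T.contains p.1 then (p.1, (1 : Int)) else p) := by
  induction T generalizing d with
  | nil => simp
  | cons t T' ih =>
    simp only [List.foldl_cons]
    by_cases hc : d.contains t = true
    · rw [if_pos hc, ih, PySem.Dict.items_insert_of_contains d 1 hc, List.map_map]
      refine List.map_congr_left (fun p _ => ?_)
      by_cases hpt : p.1 = t
      · simp [Function.comp, hpt]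
      · simp [Function.comp, hpt]
    · rw [if_neg hc, ih]
      refine List.map_congr_left (fun p hp => ?_)
      have hmem : p.1 ∈ d.keys := PySem.Dict.mem_keys_of_mem_items d hp
      have hpt : p.1 ≠ t := by
        intro h; exact hc ((PySem.Dict.contains_iff_mem_keys d t).mpr (h ▸ hmem))
      simp [hpt]

-- B's loop shape: over a list of keys all present in the dict, setting to 1 those in `pr`.
theorem pv_foldB_items (pr : List String) (L : List String) (d : PySem.Dict String Int)
    (hsub : ∀ k ∈ L, d.contains k = true) :
    (L.foldl (fun d k => if PySem.Set.contains pr k then d.insert k 1 else d) d).items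
      = d.items.map (fun p => if (L.contains p.1 && pr.contains p.1) then (p.1, (1 : Int)) else p) := by
  induction L generalizing d with
  | nil => simp
  | cons k L' ih =>
    simp only [List.foldl_cons]
    have hck : d.contains k = true := hsub k (by simp)
    by_cases hp : PySem.Set.contains pr k = true
    · rw [if_pos hp]
      have hsub' : ∀ k' ∈ L', (d.insert k 1).contains k' = true := by
        intro k' hk'
        rw [PySem.Dict.contains_insert]
        simp [hsub k' (by simp [hk'])]
      rw [ih (d.insert k 1) hsub', PySem.Dict.items_insert_of_contains d 1 hck, List.map_map]
      refine List.map_congr_left (fun p _ => ?_)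
      have hprk : pr.contains k = true := by simpa [PySem.Set.contains] using hp
      by_cases hpt : p.1 = k
      · simp [Function.comp, hpt, List.contains_iff_mem.mp hprk]
      · simp [Function.comp, hpt]
    · rw [if_neg hp, ih d (fun k' hk' => hsub k' (by simp [hk']))]
      have hprk : pr.contains k = false := by
        simpa [PySem.Set.contains] using hp
      have hnk : k ∉ pr := by simpa using hprk
      refine List.map_congr_left (fun p _ => ?_)
      by_cases hpt : p.1 = k
      · simp [hpt, hnk]
      · simp [hpt]

-- The trigram list A enumerates by index equals the zip-of-shifts trigram list B builds.
theorem pv_trigrams_eq (tt : List (String × String)) :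
    (PySem.List.pyRange 2 (tt.length : Int) 1).map (fun i =>
        (PySem.List.pyGetD tt (i - 2) ("", "")).1 ++ "+" ++
        (PySem.List.pyGetD tt (i - 1) ("", "")).1 ++ "+" ++
        (PySem.List.pyGetD tt i ("", "")).1)
      = (((tt.map (fun t => t.1)).zip (PySem.List.slice (tt.map (fun t => t.1)) (some 1) none)).zip
            (PySem.List.slice (tt.map (fun t => t.1)) (some 2) none)).map
          (fun p => p.1.1 ++ "+" ++ p.1.2 ++ "+" ++ p.2) := by
  rw [PySem.List.slice_from _ (by norm_num), PySem.List.slice_from _ (by norm_num)]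
  rw [PySem.List.pyRange_one, List.map_map]
  apply List.ext_getElem
  · simp [List.length_zip]
    omega
  · intro j h1 h2
    simp only [List.getElem_map, List.getElem_range, Function.comp]
    have hlen : j + 2 < tt.length := by
      simp [List.length_zip] at h2
      omega
    rw [List.getElem_zip, List.getElem_zip]
    simp only [List.getElem_drop, List.getElem_map, show Int.toNat 1 = 1 from rfl,
      show Int.toNat 2 = 2 from rfl]
    have e0 : PySem.List.pyGetD tt ((2 : Int) + (j : Nat) - 2) ("", "") = tt[j] := by
      rw [PySem.List.pyGetD_eq_getElem tt ("", "") (by omega) (by omega)]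
      congr 1; omega
    have e1 : PySem.List.pyGetD tt ((2 : Int) + (j : Nat) - 1) ("", "") = tt[1 + j] := by
      rw [PySem.List.pyGetD_eq_getElem tt ("", "") (by omega) (by omega)]
      congr 1; omega
    have e2 : PySem.List.pyGetD tt ((2 : Int) + (j : Nat)) ("", "") = tt[2 + j] := by
      rw [PySem.List.pyGetD_eq_getElem tt ("", "") (by omega) (by omega)]
      congr 1
    simp only [e0, e1, e2]

-- ===== VERDICT (by name: the statement is the Claim_ definition above) =====
theorem common_trigram_feature_dict_spec : Claim_equal_common_trigram_feature_dict := by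
  intro cd tt _
  unfold Spec_common_trigram_feature_dict
  unfold common_trigram_feature_dict common_trigram_feature_dict_alt
  set F : Int → String := fun i =>
    (PySem.List.pyGetD tt (i - 2) ("", "")).1 ++ "+" ++
    (PySem.List.pyGetD tt (i - 1) ("", "")).1 ++ "+" ++
    (PySem.List.pyGetD tt i ("", "")).1 with hF
  set T : List String :=
    (((tt.map (fun t => t.1)).zip (PySem.List.slice (tt.map (fun t => t.1)) (some 1) none)).zip
        (PySem.List.slice (tt.map (fun t => t.1)) (some 2) none)).map
      (fun p => p.1.1 ++ "+" ++ p.1.2 ++ "+" ++ p.2) with hT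
  have hA : ((PySem.List.pyRange 2 (tt.length : Int) 1).foldl
      (fun d i =>
        let token := (PySem.List.pyGetD tt i ("", "")).1
        let prev_token := (PySem.List.pyGetD tt (i - 1) ("", "")).1
        let prev2_token := (PySem.List.pyGetD tt (i - 2) ("", "")).1
        let trigram := prev2_token ++ "+" ++ prev_token ++ "+" ++ token
        if d.contains trigram then d.insert trigram 1 else d)
      (PySem.Dict.mk cd)).items
      = (((PySem.List.pyRange 2 (tt.length : Int) 1).map F).foldl
          (fun d t => if d.contains t then d.insert t 1 else d) (PySem.Dict.mk cd)).items := by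
    rw [List.foldl_map]
  rw [hA, hF, pv_trigrams_eq tt, ← hT, pv_foldA_items]
  have hsub : ∀ k ∈ (PySem.Dict.mk cd).keys, (PySem.Dict.mk cd).contains k = true :=
    fun k hk => (PySem.Dict.contains_iff_mem_keys _ k).mpr hk
  rw [pv_foldB_items (PySem.Set.ofList T) (PySem.Dict.mk cd).keys (PySem.Dict.mk cd) hsub]
  refine List.map_congr_left (fun p hp => ?_)
  have hmem : p.1 ∈ (PySem.Dict.mk cd).keys := PySem.Dict.mem_keys_of_mem_items _ hp
  have hkc : ((PySem.Dict.mk cd).keys).contains p.1 = true := by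
    exact List.contains_iff_mem.mpr hmem
  have hcond : T.contains p.1 = (PySem.Set.ofList T).contains p.1 := by
    rw [Bool.eq_iff_iff]
    simp [PySem.Set.contains, PySem.Set.mem_ofList]
  rw [hkc, hcond]
  simp
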